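-- pv_equiv track=rewrite | github.com/m-orlewski/advent-of-code | aoc_2024/day_9.py | get_empty_segments
-- ===== SOURCE A (Python) =====
-- def get_empty_segments(file_blocks):
--     empty_segments = [] # not dict because keys and values will change and we want to preserve the order
--     i = 0
--     while i < len(file_blocks):
--         if file_blocks[i] == '.':
--             count = 1
--             while i+count < len(file_blocks) and file_blocks[i+count] == '.':
--                 count += 1
--             empty_segments.append([i, count])
--             i += count
--         else:
--             i += 1
--     return empty_segments
-- ===== SOURCE B (Python) =====
-- def get_empty_segments(file_blocks):
--     segments = []
--     start = None  # start index of the current run of '.', or None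
--     for i, block in enumerate(file_blocks):
--         if block == '.':
--             if start is None:
--                 start = i
--         elif start is not None:
--             segments.append([start, i - start])
--             start = None
--     if start is not None:
--         segments.append([start, len(file_blocks) - start])
--     return segments
-- ===== Notes on version B (the rewrite author's own statement) =====
-- stated objective: simpler
-- what changed: Replaced A's nested while loops with manual index jumps (inner loop counting each dot run) by a single flat enumerate pass that carries the pending run's start index and closes it when a non-dot element or the end of the list is reached.
import Mathlib
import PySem

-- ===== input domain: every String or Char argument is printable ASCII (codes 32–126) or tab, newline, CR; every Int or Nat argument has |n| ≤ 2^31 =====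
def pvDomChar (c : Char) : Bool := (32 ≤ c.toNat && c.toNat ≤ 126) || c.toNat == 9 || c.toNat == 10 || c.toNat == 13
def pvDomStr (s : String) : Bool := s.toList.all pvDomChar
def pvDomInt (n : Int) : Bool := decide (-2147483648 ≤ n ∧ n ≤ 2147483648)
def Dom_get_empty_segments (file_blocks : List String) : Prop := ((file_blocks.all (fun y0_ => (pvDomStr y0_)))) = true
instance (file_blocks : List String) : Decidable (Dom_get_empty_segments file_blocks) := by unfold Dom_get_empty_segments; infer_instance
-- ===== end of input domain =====

set_option maxRecDepth 8000


-- B replaces A's nested index-jumping while loops by a single flat pass with a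
-- pending-run-start state (objective: simpler); return values proved equal.

-- ===== PORT A =====
-- while loops are ported as fuel recursion; fuel = list length (+1) always suffices,
-- so the ports compute exactly what the Python loops compute
-- inner while loop: count the run of '.' starting at i (count starts at 1)
def pvCountA (xs : List String) (i : Nat) : Nat → Nat → Nat
  | 0, count => count
  | fuel + 1, count =>
    if i + count < xs.length ∧ xs.getD (i + count) "" = "." then
      pvCountA xs i fuel (count + 1)
    else count

-- outer while loop over index i
def pvAGo (xs : List String) : Nat → Nat → List (List Int)
  | 0, _ => []
  | fuel + 1, i =>
    if i < xs.length then
      if xs.getD i "" = "." then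
        let c := pvCountA xs i xs.length 1
        [(i : Int), (c : Int)] :: pvAGo xs fuel (i + c)
      else pvAGo xs fuel (i + 1)
    else []

def get_empty_segments (file_blocks : List String) : List (List Int) :=
  pvAGo file_blocks (file_blocks.length + 1) 0

-- ===== PORT B =====
-- one step of B's for loop; state = (segments so far, start of current '.'-run or none)
def pvBStep (st : List (List Int) × Option Int) (ib : Int × String) :
    List (List Int) × Option Int :=
  if ib.2 = "." then
    match st.2 with
    | none => (st.1, some ib.1)
    | some _ => st
  else
    match st.2 with
    | some s => (st.1 ++ [[s, ib.1 - s]], none)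
    | none => st

def get_empty_segments_alt (file_blocks : List String) : List (List Int) :=
  let p := (PySem.List.enumerate file_blocks).foldl pvBStep ([], none)
  match p.2 with
  | some s => p.1 ++ [[s, (file_blocks.length : Int) - s]]
  | none => p.1

-- ===== PRECONDITION & SPEC =====
def Spec_get_empty_segments (file_blocks : List String) (out : List (List Int)) : Prop := out = get_empty_segments_alt file_blocks
instance (file_blocks : List String) (out : List (List Int)) : Decidable (Spec_get_empty_segments file_blocks out) := by unfold Spec_get_empty_segments; infer_instance

-- ===== CLAIM (what is proved, stated in full; the proofs are below) =====
def Claim_equal_get_empty_segments : Prop := ∀ (file_blocks : List String), Dom_get_empty_segments file_blocks → Spec_get_empty_segments file_blocks (get_empty_segments file_blocks)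

-- ===== LEMMAS AND PROOFS =====

-- finalisation of B's state after the loop
def pvFin (len : Nat) (p : List (List Int) × Option Int) : List (List Int) :=
  match p.2 with
  | some s => p.1 ++ [[s, (len : Int) - s]]
  | none => p.1

theorem getD_cons_drop (xs : List String) (n : Nat) (h : n < xs.length) :
    xs.drop n = xs.getD n "" :: xs.drop (n + 1) := by
  rw [List.getD_eq_getElem _ _ h]
  exact List.drop_eq_getElem_cons h

theorem len_takeWhile_le {α : Type} (p : α → Bool) (l : List α) :
    (l.takeWhile p).length ≤ l.length := by
  induction l with
  | nil => simp
  | cons x t ih =>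
    by_cases h : p x <;> simp [h] <;> omega

-- take/dropWhile as take/drop at the takeWhile length
theorem take_len_takeWhile {α : Type} (p : α → Bool) (l : List α) :
    l.take (l.takeWhile p).length = l.takeWhile p := by
  induction l with
  | nil => rfl
  | cons x t ih =>
    by_cases h : p x <;> simp [h, ih]

theorem drop_len_takeWhile {α : Type} (p : α → Bool) (l : List α) :
    l.drop (l.takeWhile p).length = l.dropWhile p := by
  induction l with
  | nil => rfl
  | cons x t ih =>
    by_cases h : p x <;> simp [h, ih]

-- the inner counter never decreases
theorem pvCountA_ge (xs : List String) (i : Nat) :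
    ∀ fuel count, count ≤ pvCountA xs i fuel count := by
  intro fuel
  induction fuel with
  | zero => intro count; simp [pvCountA]
  | succ f ih =>
    intro count
    by_cases h : i + count < xs.length ∧ xs.getD (i + count) "" = "."
    · have := ih (count + 1)
      simp only [pvCountA, if_pos h]
      omega
    · simp only [pvCountA, if_neg h]
      exact Nat.le_refl count

-- given enough fuel, pvCountA counts count + the '.'-takeWhile after position i+count
theorem pvCountA_eq (xs : List String) (i : Nat) :
    ∀ fuel count, xs.length - (i + count) < fuel →
      pvCountA xs i fuel count
        = count + ((xs.drop (i + count)).takeWhile (fun x => x == ".")).length := by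
  intro fuel
  induction fuel with
  | zero => intro count h; omega
  | succ f ih =>
    intro count hf
    by_cases h : i + count < xs.length ∧ xs.getD (i + count) "" = "."
    · obtain ⟨hlt, heq⟩ := h
      simp only [pvCountA, if_pos (And.intro hlt heq)]
      rw [ih (count + 1) (by omega), show i + (count + 1) = i + count + 1 from by omega,
          getD_cons_drop xs (i + count) hlt, heq]
      rw [List.takeWhile_cons_of_pos (by simp)]
      simp
      omega
    · simp only [pvCountA, if_neg h]
      rcases Decidable.not_and_iff_not_or_not.mp h with h1 | h2
      · rw [List.drop_eq_nil_of_le (by omega)]; simp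
      · rcases Nat.lt_or_ge (i + count) xs.length with hlt | hge
        · rw [getD_cons_drop xs (i + count) hlt]
          rw [List.takeWhile_cons_of_neg (by simpa [List.getD_eq_getElem?_getD] using h2)]
          simp
        · rw [List.drop_eq_nil_of_le hge]; simp

-- past the end of the list the outer loop returns immediately, with any fuel
theorem pvAGo_stop (xs : List String) (fuel i : Nat) (h : ¬ i < xs.length) :
    pvAGo xs fuel i = [] := by
  cases fuel <;> simp [pvAGo, h]

-- the outer loop's value does not depend on the fuel, given enough of it
theorem pvAGo_congr (xs : List String) :
    ∀ f1 i f2, xs.length - i < f1 → xs.length - i < f2 →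
      pvAGo xs f1 i = pvAGo xs f2 i := by
  intro f1
  induction f1 with
  | zero => intro i f2 h1 _; omega
  | succ g1 ih =>
    intro i f2 h1 h2
    cases f2 with
    | zero => omega
    | succ g2 =>
      by_cases hlt : i < xs.length
      · by_cases hdot : xs.getD i "" = "."
        · have hc := pvCountA_ge xs i xs.length 1
          simp only [pvAGo, if_pos hlt, if_pos hdot]
          congr 1
          exact ih (i + pvCountA xs i xs.length 1) g2 (by omega) (by omega)
        · simp only [pvAGo, if_pos hlt, if_neg hdot]
          exact ih (i + 1) g2 (by omega) (by omega)
      · rw [pvAGo_stop xs _ i hlt, pvAGo_stop xs _ i hlt]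

-- B's step leaves the state unchanged on a pending run while dots keep coming
theorem foldl_pvBStep_dots (l : List (Int × String)) (res : List (List Int)) (s : Int)
    (hall : ∀ p ∈ l, p.2 = ".") :
    l.foldl pvBStep (res, some s) = (res, some s) := by
  induction l with
  | nil => rfl
  | cons x t ih =>
    have hx : x.2 = "." := hall x (by simp)
    simp only [List.foldl_cons, pvBStep, hx]
    exact ih (fun p hp => hall p (by simp [hp]))

-- every element of a '.'-takeWhile is '.'
theorem mem_takeWhile_dot {l : List String} {x : String}
    (h : x ∈ l.takeWhile (fun y => y == ".")) : x = "." := by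
  have := List.mem_takeWhile_imp h
  simpa using this

-- main loop invariant: B's fold from position i with no pending run computes A's loop
theorem main_inv (xs : List String) :
    ∀ n i res fuel, xs.length - i ≤ n → xs.length - i < fuel →
      pvFin xs.length ((PySem.List.enumerate (xs.drop i) i).foldl pvBStep (res, none))
        = res ++ pvAGo xs fuel i := by
  intro n
  induction n with
  | zero =>
    intro i res fuel hn hf
    rw [List.drop_eq_nil_of_le (by omega), pvAGo_stop xs fuel i (by omega)]
    simp [PySem.List.enumerate_nil, pvFin]
  | succ n ih =>
    intro i res fuel hn hf
    rcases Nat.lt_or_ge i xs.length with hlt | hge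
    · obtain ⟨g, rfl⟩ : ∃ g, fuel = g + 1 := ⟨fuel - 1, by omega⟩
      by_cases hdot : xs.getD i "" = "."
      · -- a run of dots starts at i; A consumes it at once, B walks through it
        set c := pvCountA xs i xs.length 1 with hc
        have hceq := pvCountA_eq xs i xs.length 1 (by omega)
        set t := ((xs.drop (i + 1)).takeWhile (fun x => x == ".")).length with ht
        have hct : c = t + 1 := by rw [hc, hceq]; omega
        have htle : t ≤ (xs.drop (i + 1)).length := by
          rw [ht]; exact len_takeWhile_le ..
        have hicle : i + c ≤ xs.length := by
          have htle2 : t ≤ xs.length - (i + 1) := by simpa using htle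
          omega
        -- split drop i into the dot-run (length c) and the rest
        have hdd : xs.drop (i + c) = (xs.drop i).drop c := by
          rw [List.drop_drop]
        have hsplit : xs.drop i = (xs.drop i).take c ++ xs.drop (i + c) := by
          rw [hdd]; exact (List.take_append_drop c (xs.drop i)).symm
        have htake : (xs.drop i).take c
            = xs.getD i "" :: (xs.drop (i + 1)).takeWhile (fun x => x == ".") := by
          rw [getD_cons_drop xs i hlt, hct, List.take_succ_cons, ht, take_len_takeWhile]
        have hlentake : ((xs.drop i).take c).length = c := by
          simp; omega
        have hdroprest : xs.drop (i + c) = (xs.drop (i + 1)).dropWhile (fun x => x == ".") := by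
          have h2 : xs.drop (i + c) = (xs.drop (i + 1)).drop t := by
            rw [List.drop_drop]; congr 1; omega
          rw [h2, ht, drop_len_takeWhile]
        -- fold over the dot-run: state becomes (res, some i)
        have hrun : (PySem.List.enumerate ((xs.drop i).take c) i).foldl pvBStep (res, none)
            = (res, some (i : Int)) := by
          rw [htake, PySem.List.enumerate_cons]
          simp only [List.foldl_cons, pvBStep, hdot]
          apply foldl_pvBStep_dots
          intro p hp
          rcases (PySem.List.mem_enumerate_iff _ _ _).mp hp with ⟨k, hk, hpk⟩
          subst hpk
          exact mem_takeWhile_dot (List.getElem_mem hk)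
        have hAGo : pvAGo xs (g + 1) i = [(i : Int), (c : Int)] :: pvAGo xs g (i + c) := by
          simp only [pvAGo, if_pos hlt, if_pos hdot, hc]
        rw [hsplit, PySem.List.enumerate_append, List.foldl_append, hlentake, hrun]
        rcases hrest : xs.drop (i + c) with _ | ⟨y, tl⟩
        · -- run reaches the end of the list
          have hic : i + c = xs.length := by
            have hld : (xs.drop (i + c)).length = xs.length - (i + c) := List.length_drop ..
            rw [hrest] at hld; simp at hld; omega
          simp only [PySem.List.enumerate_nil, List.foldl_nil, pvFin, hAGo]
          rw [pvAGo_stop xs g (i + c) (by omega)]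
          simp
          omega
        · -- run ends at a non-dot element y
          have hy : ¬ (y == ".") := by
            have hh := List.head?_dropWhile_not (fun x => x == ".") (xs.drop (i + 1))
            rw [← hdroprest, hrest] at hh; simpa using hh
          have hy' : y ≠ "." := by simpa using hy
          have hiclt : i + c < xs.length := by
            have hld : (xs.drop (i + c)).length = xs.length - (i + c) := List.length_drop ..
            rw [hrest] at hld; simp at hld; omega
          have htl : tl = xs.drop (i + c + 1) := by
            have h2 : xs.drop (i + c + 1) = (xs.drop (i + c)).drop 1 := by
              rw [List.drop_drop]
            simp [h2, hrest]
          rw [PySem.List.enumerate_cons]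
          simp only [List.foldl_cons, pvBStep, if_neg hy']
          have hc1 : 1 ≤ c := pvCountA_ge xs i xs.length 1
          rw [htl]
          have harg : (i : Int) + (c : Int) = (((i + c : Nat)) : Int) := by push_cast; ring
          rw [harg]
          have hsc : (((i + c : Nat)) : Int) - (i : Int) = (c : Int) := by push_cast; ring
          rw [hsc]
          have harg1 : (((i + c : Nat)) : Int) + 1 = (((i + c + 1 : Nat)) : Int) := by push_cast; ring
          rw [harg1]
          have hIH := ih (i + c + 1) (res ++ [[(i : Int), (c : Int)]]) (g + 1) (by omega) (by omega)
          rw [hIH, hAGo]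
          have hgd : xs.getD (i + c) "" = y := by
            have h3 := getD_cons_drop xs (i + c) hiclt
            rw [hrest, htl] at h3
            exact ((List.cons.injEq _ _ _ _).mp h3).1.symm
          have hAGo2 : pvAGo xs g (i + c) = pvAGo xs (g + 1) (i + c + 1) := by
            obtain ⟨g', rfl⟩ : ∃ g', g = g' + 1 := ⟨g - 1, by omega⟩
            simp only [pvAGo, if_pos hiclt, if_neg (show ¬ xs.getD (i + c) "" = "." by rw [hgd]; exact hy')]
            exact pvAGo_congr xs g' (i + c + 1) (g' + 1 + 1) (by omega) (by omega)
          rw [hAGo2]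
          simp
      · -- non-dot at i: both sides just move on
        rw [getD_cons_drop xs i hlt, PySem.List.enumerate_cons]
        simp only [List.foldl_cons, pvBStep, if_neg hdot]
        have hIH := ih (i + 1) res g (by omega) (by omega)
        have harg : ((i : Nat) : Int) + 1 = (((i + 1 : Nat)) : Int) := by push_cast; ring
        rw [harg, hIH]
        conv_rhs => rw [show pvAGo xs (g + 1) i = pvAGo xs g (i + 1) from by
          simp only [pvAGo, if_pos hlt, if_neg hdot]]
    · rw [List.drop_eq_nil_of_le hge, pvAGo_stop xs fuel i (by omega)]
      simp [PySem.List.enumerate_nil, pvFin]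

-- ===== VERDICT (by name: the statement is the Claim_ definition above) =====
theorem get_empty_segments_spec : Claim_equal_get_empty_segments := by
  intro xs _
  unfold Spec_get_empty_segments get_empty_segments get_empty_segments_alt
  have h := main_inv xs xs.length 0 [] (xs.length + 1) (by omega) (by omega)
  simpa [pvFin] using h.symm
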